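-- pv_equiv track=rewrite | github.com/kje016/INF247 | Stream Ciphers/Matrix_HF.py | get_row_result2
-- ===== SOURCE A (Python) =====
-- from functools import reduce
--
-- def get_variabel_coef2(matrix_row, relevant_variables, list_of_results):
--     relevant_variables.pop(0)   #remove the variable we are trying to solve
--
--     relevant_coefficients = []
--     for i in relevant_variables:
--         relevant_coefficients.append(list_of_results[i])
--     result_coef = reduce(lambda x,y: x^y, relevant_coefficients)
--     return (result_coef^matrix_row[-1])
--
-- def get_row_result2(input_row, list_of_results):
--     relevant_variables = []
--     for index in range( len(input_row)-1):
--         if input_row[index] == 1: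
--             relevant_variables.append(index)
--     if len(relevant_variables) == 1:
--         method_result = input_row[-1]               #input_row[-1] is the right-hand side of the equation
--         return method_result
--     else:
--         method_result = get_variabel_coef2(input_row, relevant_variables, list_of_results)
--         return method_result
-- ===== SOURCE B (Python) =====
-- def get_row_result2(input_row, list_of_results):
--     result = input_row[-1]
--     solved = input_row.index(1)
--     for index in range(solved + 1, len(input_row) - 1):
--         if input_row[index] == 1:
--             result ^= list_of_results[index]
--     return result
-- ===== Notes on version B (the rewrite author's own statement) =====
-- stated objective: simpler
-- what changed: Replaces A's three-pass pipeline (build index list, branch on its length, helper builds a coefficient list and reduce-XORs it after popping the solved variable) by locating the solved variable with input_row.index(1) and one XOR loop over the remaining columns onto the right-hand side; Pre_ excludes rows with no 1-entry among the coefficients, where A raises IndexError from pop(0).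
import Mathlib
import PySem

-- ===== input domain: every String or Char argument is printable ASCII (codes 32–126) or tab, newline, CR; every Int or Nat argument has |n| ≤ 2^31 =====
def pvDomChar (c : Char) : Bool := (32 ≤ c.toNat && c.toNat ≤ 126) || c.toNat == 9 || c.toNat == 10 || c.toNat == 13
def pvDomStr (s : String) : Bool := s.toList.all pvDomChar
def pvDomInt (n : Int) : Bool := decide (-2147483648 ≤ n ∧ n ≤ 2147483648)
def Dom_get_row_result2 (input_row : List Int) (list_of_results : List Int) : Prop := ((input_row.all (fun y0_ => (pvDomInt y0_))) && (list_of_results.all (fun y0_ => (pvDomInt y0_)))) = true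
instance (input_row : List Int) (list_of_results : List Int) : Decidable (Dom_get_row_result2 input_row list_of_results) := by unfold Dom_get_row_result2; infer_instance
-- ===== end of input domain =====

-- B replaces A's three-pass pipeline (index list, length branch, helper with coefficient list + reduce)
-- by index(1) to locate the solved variable plus one XOR loop over the rest; equal return value on Pre_ (where A returns).


-- ===== PORT A =====
def get_variabel_coef2 (matrix_row : List Int) (relevant_variables : List Int) (list_of_results : List Int) : Int :=
  -- relevant_variables.pop(0): Python raises IndexError on []; Pre_ excludes those inputs
  let rv := relevant_variables.drop 1
  let relevant_coefficients := rv.foldl (fun acc i => acc ++ [PySem.List.pyGetD list_of_results i 0]) []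
  -- reduce on an empty list raises TypeError in Python; Pre_ excludes those inputs (0 is a dummy)
  let result_coef : Int :=
    match relevant_coefficients with
    | [] => 0
    | c :: cs => cs.foldl (fun x y => PySem.Int.bxor x y) c
  PySem.Int.bxor result_coef (PySem.List.pyGetD matrix_row (-1) 0)

def get_row_result2 (input_row : List Int) (list_of_results : List Int) : Int :=
  let relevant_variables :=
    (PySem.List.pyRange 0 ((input_row.length : Int) - 1)).foldl
      (fun acc index => if PySem.List.pyGetD input_row index 0 == 1 then acc ++ [index] else acc) []
  if relevant_variables.length == 1 then
    PySem.List.pyGetD input_row (-1) 0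
  else
    get_variabel_coef2 input_row relevant_variables list_of_results

-- ===== PORT B =====
def get_row_result2_alt (input_row : List Int) (list_of_results : List Int) : Int :=
  -- input_row.index(1): Python raises ValueError when 1 is absent; Pre_ excludes those inputs (0 is a dummy)
  let solved : Int := (((PySem.List.index? input_row 1).getD 0 : Nat) : Int)
  (PySem.List.pyRange (solved + 1) ((input_row.length : Int) - 1)).foldl
    (fun result index =>
      if PySem.List.pyGetD input_row index 0 == 1 then
        PySem.Int.bxor result (PySem.List.pyGetD list_of_results index 0)
      else result)
    (PySem.List.pyGetD input_row (-1) 0)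

-- ===== PRECONDITION & SPEC =====
-- Pre_ = exactly the inputs where the Python A returns: at least one coefficient-1 column exists
-- (otherwise pop(0) raises IndexError), and every 1-column after the first indexes into
-- list_of_results (otherwise list_of_results[i] raises IndexError).
def Pre_get_row_result2 (input_row : List Int) (list_of_results : List Int) : Prop :=
  ((List.range (input_row.length - 1)).filter (fun i => input_row.getD i 0 == 1)) ≠ [] ∧
  ∀ i ∈ ((List.range (input_row.length - 1)).filter (fun i => input_row.getD i 0 == 1)).drop 1,
    i < list_of_results.length
instance (input_row : List Int) (list_of_results : List Int) : Decidable (Pre_get_row_result2 input_row list_of_results) := by unfold Pre_get_row_result2; infer_instance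

def pvWitness_get_row_result2 : List Int × List Int := ([1, 1, 5], [3, 4])

def Spec_get_row_result2 (input_row : List Int) (list_of_results : List Int) (out : Int) : Prop := out = get_row_result2_alt input_row list_of_results
instance (input_row : List Int) (list_of_results : List Int) (out : Int) : Decidable (Spec_get_row_result2 input_row list_of_results out) := by unfold Spec_get_row_result2; infer_instance

-- ===== CLAIM (what is proved, stated in full; the proofs are below) =====
def Claim_equal_get_row_result2 : Prop := ∀ (input_row : List Int) (list_of_results : List Int), Dom_get_row_result2 input_row list_of_results → Pre_get_row_result2 input_row list_of_results → Spec_get_row_result2 input_row list_of_results (get_row_result2 input_row list_of_results)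

-- ===== LEMMAS AND PROOFS =====

-- every Int is (n) or (-n-1) for a Nat n
lemma pvRep (a : Int) : ∃ (s : Bool) (n : Nat), a = (if s then -(n : Int) - 1 else (n : Int)) := by
  rcases a with m | m
  · exact ⟨false, m, by simp⟩
  · exact ⟨true, m, by simp [Int.negSucc_eq]; ring⟩

lemma pvBxorNP (m n : Nat) :
    PySem.Int.bxor (m : Int) (-(n : Int) - 1) = -((m ^^^ n : Nat) : Int) - 1 := by
  unfold PySem.Int.bxor
  rw [if_pos (by omega), if_neg (by omega)]
  rw [show ((m : Int)).toNat = m by omega, show (-(-(n : Int) - 1) - 1).toNat = n by omega]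

lemma pvBxorPN (m n : Nat) :
    PySem.Int.bxor (-(m : Int) - 1) (n : Int) = -((m ^^^ n : Nat) : Int) - 1 := by
  unfold PySem.Int.bxor
  rw [if_neg (by omega), if_pos (by omega)]
  rw [show ((n : Int)).toNat = n by omega, show (-(-(m : Int) - 1) - 1).toNat = m by omega]

lemma pvBxorPP (m n : Nat) :
    PySem.Int.bxor (-(m : Int) - 1) (-(n : Int) - 1) = ((m ^^^ n : Nat) : Int) := by
  unfold PySem.Int.bxor
  rw [if_neg (by omega), if_neg (by omega)]
  rw [show (-(-(m : Int) - 1) - 1).toNat = m by omega,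
      show (-(-(n : Int) - 1) - 1).toNat = n by omega]

lemma pvBxorIf (s t : Bool) (m n : Nat) :
    PySem.Int.bxor (if s then -(m : Int) - 1 else (m : Int)) (if t then -(n : Int) - 1 else (n : Int))
      = (if xor s t then -((m ^^^ n : Nat) : Int) - 1 else ((m ^^^ n : Nat) : Int)) := by
  cases s <;> cases t <;> simp only [if_true, if_false, Bool.false_eq_true,
    Bool.xor_false, Bool.xor_true, Bool.not_true, Bool.not_false]
  · exact PySem.Int.bxor_natCast m n
  · exact pvBxorNP m n
  · exact pvBxorPN m n
  · exact pvBxorPP m n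

lemma pvBxor_assoc (a b c : Int) :
    PySem.Int.bxor (PySem.Int.bxor a b) c = PySem.Int.bxor a (PySem.Int.bxor b c) := by
  obtain ⟨s, m, rfl⟩ := pvRep a
  obtain ⟨t, n, rfl⟩ := pvRep b
  obtain ⟨u, k, rfl⟩ := pvRep c
  rw [pvBxorIf, pvBxorIf, pvBxorIf, pvBxorIf, Bool.xor_assoc, Nat.xor_assoc]

lemma pvBxor_right_swap (x y z : Int) :
    PySem.Int.bxor (PySem.Int.bxor x y) z = PySem.Int.bxor (PySem.Int.bxor x z) y := by
  rw [pvBxor_assoc, pvBxor_assoc, PySem.Int.bxor_comm y z]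

-- pull a constant out of a bxor-accumulating fold
lemma pvFoldl_bxor_out (g : Nat → Int) (l : List Nat) :
    ∀ x y : Int, l.foldl (fun a i => PySem.Int.bxor a (g i)) (PySem.Int.bxor x y)
      = PySem.Int.bxor (l.foldl (fun a i => PySem.Int.bxor a (g i)) x) y := by
  induction l with
  | nil => intro x y; rfl
  | cons i l ih =>
      intro x y
      simp only [List.foldl_cons, pvBxor_right_swap _ y (g i)]
      exact ih (PySem.Int.bxor x (g i)) y

-- the head of a filtered ascending range is its least element satisfying p, and the tail restarts after it
lemma pvFilterRange (p : Nat → Bool) :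
    ∀ (n a j : Nat) (rest : List Nat), (List.range' a n).filter p = j :: rest →
      p j = true ∧ a ≤ j ∧ j < a + n ∧ (∀ i, a ≤ i → i < j → p i = false) ∧
      rest = (List.range' (j + 1) (a + n - (j + 1))).filter p := by
  intro n
  induction n with
  | zero => intro a j rest h; simp at h
  | succ n ih =>
      intro a j rest h
      rw [List.range'_succ, List.filter_cons] at h
      by_cases hpa : p a = true
      · rw [if_pos hpa] at h
        injection h with h1 h2
        subst h1; subst h2
        refine ⟨hpa, le_refl a, by omega, fun i h1 h2 => absurd h1 (by omega), ?_⟩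
        have harith : a + (n + 1) - (a + 1) = n := by omega
        rw [harith]
      · rw [if_neg hpa] at h
        obtain ⟨hpj, h1, h2, hmin, hrest⟩ := ih (a + 1) j rest h
        refine ⟨hpj, by omega, by omega, ?_, by
          rw [hrest, show a + 1 + n - (j + 1) = a + (n + 1) - (j + 1) by omega]⟩
        intro i hi1 hi2
        rcases Nat.eq_or_lt_of_le hi1 with rfl | hlt
        · simpa using hpa
        · exact hmin i hlt hi2

-- index? finds exactly the first position holding the value
lemma pvIndexAt (xs : List Int) (j : Nat) (hj : j < xs.length) (hv : xs[j] = 1)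
    (hmin : ∀ i (hi : i < j), xs[i]'(by omega) ≠ 1) :
    PySem.List.index? xs 1 = some j := by
  rw [PySem.List.index?_eq_some_iff]
  refine ⟨xs.take j, xs.drop (j + 1), ?_, by simp; omega, ?_⟩
  · conv_lhs => rw [← List.take_append_drop j xs]
    rw [List.drop_eq_getElem_cons hj, hv]
  · intro hmem
    obtain ⟨i, hi, hieq⟩ := List.getElem_of_mem hmem
    rw [List.getElem_take] at hieq
    exact hmin i ((by simpa using hi : i < j ∧ i < xs.length).1) hieq

-- ===== VERDICT (by name: the statement is the Claim_ definition above) =====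
theorem get_row_result2_spec : Claim_equal_get_row_result2 := by
  intro input_row list_of_results _hdom hpre
  unfold Spec_get_row_result2 get_row_result2 get_row_result2_alt get_variabel_coef2
  obtain ⟨hne, _hbound⟩ := hpre
  -- the row is nonempty (else the filtered range is empty)
  have hlen : 1 ≤ input_row.length := by
    by_contra h
    have : input_row.length - 1 = 0 := by omega
    simp [this] at hne
  set n := input_row.length - 1 with hn
  have hcast : (input_row.length : Int) - 1 = (n : Int) := by omega
  rw [hcast, PySem.List.pyRange_zero_natCast, List.foldl_map]
  set p : Nat → Bool := fun i => input_row.getD i 0 == 1 with hp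
  set g : Nat → Int := fun i => PySem.List.pyGetD list_of_results (i : Int) 0 with hg
  -- A's index list is the filtered range, cast to Int
  have hA : (List.range n).foldl
      (fun (acc : List Int) (i : Nat) => if PySem.List.pyGetD input_row (i : Int) 0 == 1 then acc ++ [(i : Int)] else acc) []
      = ((List.range n).filter p).map (fun k : Nat => (k : Int)) := by
    rw [PySem.List.foldl_append_if (fun i => PySem.List.pyGetD input_row ((i : Nat) : Int) 0 == 1)
        (fun i => ((i : Nat) : Int))]
    rw [List.nil_append]
    have hfe : (fun i => PySem.List.pyGetD input_row ((i : Nat) : Int) 0 == 1) = p := by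
      funext i; simp [PySem.List.pyGetD_natCast, hp]
    rw [hfe]
  rw [hA]
  -- the filtered range is nonempty: name its head and tail
  obtain ⟨j, rest, hi⟩ : ∃ j rest, (List.range n).filter p = j :: rest := by
    match hl : (List.range n).filter p with
    | [] => exact absurd hl hne
    | j :: rest => exact ⟨j, rest, rfl⟩
  have hfr := pvFilterRange p n 0 j rest (by rwa [← List.range_eq_range'])
  obtain ⟨hpj, -, hjn, hminp, hrest⟩ := hfr
  have hjlt : j < input_row.length := by omega
  -- B's index(1) finds exactly j
  have hidx : PySem.List.index? input_row 1 = some j := by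
    refine pvIndexAt input_row j hjlt ?_ ?_
    · have := hpj
      simp only [hp, List.getD_eq_getElem?_getD, List.getElem?_eq_getElem hjlt] at this
      simpa using this
    · intro i hi hcon
      have hilt : i < input_row.length := by omega
      have := hminp i (Nat.zero_le i) hi
      simp only [hp, List.getD_eq_getElem?_getD, List.getElem?_eq_getElem hilt] at this
      simp [hcon] at this
  rw [hidx]
  simp only [Option.getD_some]
  -- B's loop over range(j+1, n) is the XOR fold over rest
  have hB : (PySem.List.pyRange ((((j : Nat) : Int)) + 1) (n : Int)).foldl
      (fun result index =>
        if PySem.List.pyGetD input_row index 0 == 1 then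
          PySem.Int.bxor result (PySem.List.pyGetD list_of_results index 0)
        else result)
      (PySem.List.pyGetD input_row (-1) 0)
      = rest.foldl (fun x i => PySem.Int.bxor x (g i)) (PySem.List.pyGetD input_row (-1) 0) := by
    have hm : ((n : Int) - (((j : Nat) : Int) + 1)).toNat = n - (j + 1) := by omega
    rw [PySem.List.pyRange_one, hm]
    have hmap : (fun k : Nat => ((j : Nat) : Int) + 1 + (k : Int))
        = (fun k : Nat => ((j + 1 + k : Nat) : Int)) := by
      funext k; push_cast; ring
    rw [hmap, List.foldl_map]
    have hstep : (fun (result : Int) (k : Nat) =>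
        if PySem.List.pyGetD input_row (((j + 1 + k : Nat) : Int)) 0 == 1 then
          PySem.Int.bxor result (PySem.List.pyGetD list_of_results (((j + 1 + k : Nat) : Int)) 0)
        else result)
        = (fun result k => if p (j + 1 + k) then PySem.Int.bxor result (g (j + 1 + k)) else result) := by
      funext result k
      simp only [hp, hg, PySem.List.pyGetD_natCast]
    rw [hstep, hrest]
    rw [show 0 + n - (j + 1) = n - (j + 1) by omega]
    rw [List.range'_eq_map_range, List.filter_map, List.foldl_map, ← List.foldl_filter]
    rfl
  rw [hB]
  -- case on the tail of the index list
  rw [hi]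
  match rest with
  | [] => simp
  | r0 :: rtail =>
    have hlen2 : ¬ ((((j :: r0 :: rtail).map (fun k : Nat => (k : Int))).length == 1) = true) := by
      simp
    rw [if_neg hlen2]
    -- A's coefficient list is the map of g over the tail
    have hcoef : (((j :: r0 :: rtail).map (fun k : Nat => (k : Int))).drop 1).foldl
        (fun acc i => acc ++ [PySem.List.pyGetD list_of_results i 0]) []
        = g r0 :: rtail.map g := by
      simp only [List.map_cons, List.drop_succ_cons, List.drop_zero]
      rw [show ((r0 : Int) :: rtail.map (fun k : Nat => (k : Int)))
            = (r0 :: rtail).map (fun k : Nat => (k : Int)) from rfl]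
      rw [List.foldl_map, PySem.List.foldl_append_singleton_eq_map, List.nil_append]
      simp [hg]
    simp only [hcoef]
    show PySem.Int.bxor ((rtail.map g).foldl (fun x y => PySem.Int.bxor x y) (g r0))
        (PySem.List.pyGetD input_row (-1) 0)
      = (r0 :: rtail).foldl (fun x i => PySem.Int.bxor x (g i))
          (PySem.List.pyGetD input_row (-1) 0)
    rw [List.foldl_map, List.foldl_cons]
    rw [PySem.Int.bxor_comm (PySem.List.pyGetD input_row (-1) 0) (g r0),
        ← pvFoldl_bxor_out g rtail (g r0) (PySem.List.pyGetD input_row (-1) 0)]
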